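-- pv_equiv track=rewrite | github.com/ibab/lhcb-software | Alignment/Alignment/Escher/python/CompareAlignmentConstants/AlignmentComparisonPlots.py | getAllIOVs
-- ===== SOURCE A (Python) =====
-- def getAllIOVs( listOfIOVLists ):
--     """
--     Combine a list of IOV lists to make the most division that covers all different intervals
--
--     Input [ [ ( begin, end ) ] ] where [ ( begin, end ) ] is a division in IOVs
--     """
--     beginTimesSet = set()
--     endTimesSet   = set()
--     for iovList in listOfIOVLists:
--         beginTimesSet |= set( begin for begin, end in iovList )
--         endTimesSet   |= set( end for begin, end in iovList )
--
--     beginOrdered = list(sorted(beginTimesSet))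
--     endOrdered   = list(sorted(endTimesSet))
--
--     allIOVsList = []
--     ib, ie = 0, 0
--     while ( ib < len(beginOrdered) ) and ( ie < len(endOrdered) ):
--         if endOrdered[ie] > beginOrdered[ib]:
--             allIOVsList.append(( beginOrdered[ib], endOrdered[ie] ))
--             ib += 1
--         else:
--             ie += 1
--
--     return allIOVsList
-- ===== SOURCE B (Python) =====
-- import bisect
--
-- def getAllIOVs( listOfIOVLists ):
--     """
--     Combine a list of IOV lists to make the most division that covers all different intervals.
--     Same begins/ends extraction as A, but each begin is paired with the first strictly
--     greater end found by binary search instead of a two-pointer merge.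
--     """
--     begins = sorted({b for iovs in listOfIOVLists for b, _ in iovs})
--     ends   = sorted({e for iovs in listOfIOVLists for _, e in iovs})
--
--     allIOVsList = []
--     for b in begins:
--         i = bisect.bisect_right(ends, b)
--         if i == len(ends):
--             break
--         allIOVsList.append((b, ends[i]))
--     return allIOVsList
-- ===== Notes on version B (the rewrite author's own statement) =====
-- stated objective: alternative
-- what changed: The two-pointer while-loop merge over the sorted begin/end lists is replaced by a per-begin binary search (bisect_right) into the sorted ends, pairing each begin with the first strictly greater end and stopping when none exists; the begin/end sets are collected by one comprehension instead of a fold of set unions.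
import Mathlib
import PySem

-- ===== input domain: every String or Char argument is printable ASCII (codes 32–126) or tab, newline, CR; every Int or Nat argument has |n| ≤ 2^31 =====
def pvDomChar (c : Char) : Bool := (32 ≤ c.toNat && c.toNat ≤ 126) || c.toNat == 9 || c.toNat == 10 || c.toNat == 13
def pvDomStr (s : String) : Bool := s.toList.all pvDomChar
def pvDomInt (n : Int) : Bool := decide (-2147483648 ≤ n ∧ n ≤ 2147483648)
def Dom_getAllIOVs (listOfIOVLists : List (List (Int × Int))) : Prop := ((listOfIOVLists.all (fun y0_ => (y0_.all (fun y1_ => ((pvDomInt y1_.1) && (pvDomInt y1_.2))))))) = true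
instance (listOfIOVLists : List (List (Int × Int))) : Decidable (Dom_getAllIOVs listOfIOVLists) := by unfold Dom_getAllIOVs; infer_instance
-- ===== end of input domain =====

-- B replaces A's two-pointer merge of the sorted begin/end lists by a per-begin
-- binary search (bisect_right) into the sorted ends; an alternative algorithm, not faster.


-- ===== PORT A =====
-- the while loop of A, with the indices ib/ie realised as the remaining suffixes
def pvLoopA : List Int → List Int → List (Int × Int)
  | b :: bs, e :: es =>
    if e > b then (b, e) :: pvLoopA bs (e :: es)
    else pvLoopA (b :: bs) es
  | _, _ => []
termination_by bs es => bs.length + es.length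

def getAllIOVs (listOfIOVLists : List (List (Int × Int))) : List (Int × Int) :=
  let sets := listOfIOVLists.foldl
    (fun (st : PySem.Set Int × PySem.Set Int) iovList =>
      (PySem.Set.union st.1 (PySem.Set.ofList (iovList.map Prod.fst)),
       PySem.Set.union st.2 (PySem.Set.ofList (iovList.map Prod.snd))))
    (PySem.Set.empty, PySem.Set.empty)
  let beginOrdered := PySem.List.sorted sets.1 (fun x => x)
  let endOrdered := PySem.List.sorted sets.2 (fun x => x)
  pvLoopA beginOrdered endOrdered

-- ===== PORT B =====
-- the for-loop of Source B: for each begin, bisect_right into the fixed ends list; break when exhausted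
def pvLoopB (ends : List Int) : List Int → List (Int × Int)
  | [] => []
  | b :: bs =>
    let i := PySem.List.bisectRight ends b
    if i = ends.length then []
    else (b, PySem.List.pyGetD ends (i : Int) 0) :: pvLoopB ends bs

def getAllIOVs_alt (listOfIOVLists : List (List (Int × Int))) : List (Int × Int) :=
  let begins := PySem.List.sorted
    (PySem.Set.ofList (listOfIOVLists.flatMap (fun iovs => iovs.map Prod.fst))) (fun x => x)
  let ends := PySem.List.sorted
    (PySem.Set.ofList (listOfIOVLists.flatMap (fun iovs => iovs.map Prod.snd))) (fun x => x)
  pvLoopB ends begins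

-- ===== PRECONDITION & SPEC =====
def Spec_getAllIOVs (listOfIOVLists : List (List (Int × Int))) (out : List (Int × Int)) : Prop := out = getAllIOVs_alt listOfIOVLists
instance (listOfIOVLists : List (List (Int × Int))) (out : List (Int × Int)) : Decidable (Spec_getAllIOVs listOfIOVLists out) := by unfold Spec_getAllIOVs; infer_instance

-- ===== CLAIM (what is proved, stated in full; the proofs are below) =====
def Claim_equal_getAllIOVs : Prop := ∀ (listOfIOVLists : List (List (Int × Int))), Dom_getAllIOVs listOfIOVLists → Spec_getAllIOVs listOfIOVLists (getAllIOVs listOfIOVLists)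


-- ===== LEMMAS AND PROOFS =====

theorem pv_foldl_pair {α β γ : Type} (l : List γ) (g1 : α → γ → α) (g2 : β → γ → β)
    (a : α) (b : β) :
    l.foldl (fun st x => (g1 st.1 x, g2 st.2 x)) (a, b) = (l.foldl g1 a, l.foldl g2 b) := by
  induction l generalizing a b with
  | nil => rfl
  | cons x xs ih => simpa using ih (g1 a x) (g2 b x)

theorem pv_foldl_union_mem (l : List (List (Int × Int))) (f : (Int × Int) → Int)
    (s : PySem.Set Int) (x : Int) :
    x ∈ l.foldl (fun (s : PySem.Set Int) iovList =>
        PySem.Set.union s (PySem.Set.ofList (iovList.map f))) s ↔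
      x ∈ s ∨ x ∈ l.flatMap (fun iovs => iovs.map f) := by
  induction l generalizing s with
  | nil => simp
  | cons iov l ih =>
    simp only [List.foldl_cons, ih, PySem.Set.mem_union, PySem.Set.mem_ofList,
      List.flatMap_cons, List.mem_append]
    tauto

theorem pv_foldl_union_nodup (l : List (List (Int × Int))) (f : (Int × Int) → Int)
    (s : PySem.Set Int) (hs : s.Nodup) :
    (l.foldl (fun (s : PySem.Set Int) iovList =>
        PySem.Set.union s (PySem.Set.ofList (iovList.map f))) s).Nodup := by
  induction l generalizing s with
  | nil => exact hs
  | cons iov l ih => exact ih _ (PySem.Set.nodup_union _ _ hs)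

theorem pv_sorted_eq (l : List (List (Int × Int))) (f : (Int × Int) → Int) :
    PySem.List.sorted (l.foldl (fun (s : PySem.Set Int) iovList =>
        PySem.Set.union s (PySem.Set.ofList (iovList.map f))) PySem.Set.empty) (fun x => x)
      = PySem.List.sorted
          (PySem.Set.ofList (l.flatMap (fun iovs => iovs.map f))) (fun x => x) := by
  rw [PySem.List.sorted_id_eq_sorted_id_iff_perm]
  rw [List.perm_ext_iff_of_nodup
    (pv_foldl_union_nodup l f PySem.Set.empty (by simp [PySem.Set.empty]))
    (PySem.Set.nodup_ofList _)]
  intro a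
  rw [pv_foldl_union_mem, PySem.Set.mem_ofList]
  simp [PySem.Set.empty]

-- the key invariant: with every element of `pre` ≤ every remaining begin, the
-- two-pointer loop on the suffix `es` agrees with the bisect loop on the whole ends list
theorem pv_loop_agree (pre es bs : List Int)
    (hbs : bs.Pairwise (· ≤ ·))
    (hends : (pre ++ es).Pairwise (· ≤ ·))
    (hpre : ∀ e ∈ pre, ∀ b ∈ bs, e ≤ b) :
    pvLoopA bs es = pvLoopB (pre ++ es) bs := by
  match bs, es with
  | [], es => simp [pvLoopA, pvLoopB]
  | b :: bs, [] =>
    obtain ⟨hle, h2, h3⟩ := PySem.List.bisectRight_spec (pre ++ []) b hends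
    have hi : PySem.List.bisectRight (pre ++ []) b = (pre ++ []).length := by
      by_contra hne
      have hlt : PySem.List.bisectRight (pre ++ []) b < (pre ++ []).length :=
        lt_of_le_of_ne hle hne
      have := h3 _ hlt le_rfl
      have hm : (pre ++ [])[PySem.List.bisectRight (pre ++ []) b] ∈ pre := by
        exact (List.mem_append.mp (List.getElem_mem hlt)).resolve_right (by simp)
      exact absurd (hpre _ hm b (List.mem_cons_self ..)) (not_le.mpr this)
    rw [List.append_nil] at hi
    simp [pvLoopA, pvLoopB, hi]
  | b :: bs, e :: es =>
    have hbsbs : ∀ b' ∈ bs, b ≤ b' := (List.pairwise_cons.mp hbs).1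
    by_cases hbe : e > b
    · have hn : pre.length < (pre ++ e :: es).length := by simp
      obtain ⟨hle, h2, h3⟩ := PySem.List.bisectRight_spec (pre ++ e :: es) b hends
      have he : (pre ++ e :: es)[pre.length] = e := by
        simp [List.getElem_append_right (le_refl pre.length)]
      have hi : PySem.List.bisectRight (pre ++ e :: es) b = pre.length := by
        rcases lt_trichotomy (PySem.List.bisectRight (pre ++ e :: es) b) pre.length with h | h | h
        · have hlt : PySem.List.bisectRight (pre ++ e :: es) b < (pre ++ e :: es).length :=
            lt_of_lt_of_le h (le_of_lt hn)
          have hgt := h3 _ hlt le_rfl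
          have hm : (pre ++ e :: es)[PySem.List.bisectRight (pre ++ e :: es) b] ∈ pre := by
            have h' : (pre ++ e :: es)[PySem.List.bisectRight (pre ++ e :: es) b] =
                pre[PySem.List.bisectRight (pre ++ e :: es) b]'h :=
              List.getElem_append_left h
            rw [h']; exact List.getElem_mem h
          exact absurd (hpre _ hm b (List.mem_cons_self ..)) (not_le.mpr hgt)
        · exact h
        · have := h2 pre.length hn h
          rw [he] at this
          exact absurd hbe (not_lt.mpr this)
      have step : pvLoopB (pre ++ e :: es) (b :: bs) =
          (b, e) :: pvLoopB (pre ++ e :: es) bs := by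
        rw [pvLoopB]
        simp only [hi]
        rw [if_neg (Nat.ne_of_lt hn)]
        rw [PySem.List.pyGetD_natCast, List.getD_eq_getElem _ _ hn, he]
      rw [step, pvLoopA, if_pos hbe]
      have ih := pv_loop_agree pre (e :: es) bs (List.pairwise_cons.mp hbs).2 hends
        (fun e' he' b' hb' => le_trans (hpre e' he' b (List.mem_cons_self ..)) (hbsbs b' hb'))
      rw [ih]
    · rw [pvLoopA, if_neg hbe]
      have hends' : ((pre ++ [e]) ++ es).Pairwise (· ≤ ·) := by
        simpa [List.append_assoc] using hends
      have hpre' : ∀ e' ∈ pre ++ [e], ∀ b' ∈ b :: bs, e' ≤ b' := by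
        intro e' he' b' hb'
        have hbb' : b ≤ b' := by
          rcases List.mem_cons.mp hb' with h | h
          · exact le_of_eq h.symm
          · exact hbsbs b' h
        rcases List.mem_append.mp he' with h | h
        · exact hpre e' h b' hb'
        · have : e' = e := by simpa using h
          exact le_trans (this ▸ not_lt.mp hbe) hbb'
      have ih := pv_loop_agree (pre ++ [e]) es (b :: bs) hbs hends' hpre'
      rw [ih, List.append_assoc]
      rfl
termination_by (bs.length + es.length, es.length)

-- ===== VERDICT (by name: the statement is the Claim_ definition above) =====
theorem getAllIOVs_spec : Claim_equal_getAllIOVs := by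
  intro l _
  unfold Spec_getAllIOVs getAllIOVs getAllIOVs_alt
  show pvLoopA
      (PySem.List.sorted (l.foldl (fun (st : PySem.Set Int × PySem.Set Int) iovList =>
        (PySem.Set.union st.1 (PySem.Set.ofList (iovList.map Prod.fst)),
         PySem.Set.union st.2 (PySem.Set.ofList (iovList.map Prod.snd))))
        (PySem.Set.empty, PySem.Set.empty)).1 (fun x => x))
      (PySem.List.sorted (l.foldl (fun (st : PySem.Set Int × PySem.Set Int) iovList =>
        (PySem.Set.union st.1 (PySem.Set.ofList (iovList.map Prod.fst)),
         PySem.Set.union st.2 (PySem.Set.ofList (iovList.map Prod.snd))))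
        (PySem.Set.empty, PySem.Set.empty)).2 (fun x => x))
    = pvLoopB
        (PySem.List.sorted (PySem.Set.ofList (l.flatMap (fun iovs => iovs.map Prod.snd))) (fun x => x))
        (PySem.List.sorted (PySem.Set.ofList (l.flatMap (fun iovs => iovs.map Prod.fst))) (fun x => x))
  rw [pv_foldl_pair l
    (fun (s : PySem.Set Int) iovList => PySem.Set.union s (PySem.Set.ofList (iovList.map Prod.fst)))
    (fun (s : PySem.Set Int) iovList => PySem.Set.union s (PySem.Set.ofList (iovList.map Prod.snd)))]
  rw [pv_sorted_eq l Prod.fst, pv_sorted_eq l Prod.snd]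
  have hbs := (PySem.List.sorted_ofList_pairwise_lt
    (l.flatMap (fun iovs => iovs.map Prod.fst))).imp (fun h => le_of_lt h)
  have hes := (PySem.List.sorted_ofList_pairwise_lt
    (l.flatMap (fun iovs => iovs.map Prod.snd))).imp (fun h => le_of_lt h)
  have := pv_loop_agree [] (PySem.List.sorted
      (PySem.Set.ofList (l.flatMap (fun iovs => iovs.map Prod.snd))) (fun x => x))
    (PySem.List.sorted
      (PySem.Set.ofList (l.flatMap (fun iovs => iovs.map Prod.fst))) (fun x => x))
    hbs (by simpa using hes) (by simp)
  simpa using this
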